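-- pv_equiv track=rewrite | github.com/cla7aye15I4nd/TypePython | tests/fixtures/valid/advanced/algorithms/prime_sieve.py | sum_primes_under
-- ===== SOURCE A (Python) =====
-- def is_prime(n: int) -> bool:
--     if n < 2:
--         return False
--     if n == 2:
--         return True
--     if n % 2 == 0:
--         return False
--
--     i: int = 3
--     while i * i <= n:
--         if n % i == 0:
--             return False
--         i = i + 2
--
--     return True
--
-- def sum_primes_under(n: int) -> int:
--     sum: int = 0
--     i: int = 2
--
--     while i < n:
--         if is_prime(i):
--             sum = sum + i
--         i = i + 1
--
--     return sum
-- ===== SOURCE B (Python) =====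
-- def sum_primes_under(n: int) -> int:
--     if n <= 2:
--         return 0
--     sieve = [True] * n
--     sieve[0] = False
--     sieve[1] = False
--     i = 2
--     while i * i < n:
--         for j in range(i * i, n, i):
--             sieve[j] = False
--         i = i + 1
--     return sum(k for k, flag in enumerate(sieve) if flag)
-- ===== Notes on version B (the rewrite author's own statement) =====
-- stated objective: faster
-- what changed: Replaces the per-number trial-division primality test with a Sieve of Eratosthenes over a boolean array, then sums the indices left unmarked.
import Mathlib
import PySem

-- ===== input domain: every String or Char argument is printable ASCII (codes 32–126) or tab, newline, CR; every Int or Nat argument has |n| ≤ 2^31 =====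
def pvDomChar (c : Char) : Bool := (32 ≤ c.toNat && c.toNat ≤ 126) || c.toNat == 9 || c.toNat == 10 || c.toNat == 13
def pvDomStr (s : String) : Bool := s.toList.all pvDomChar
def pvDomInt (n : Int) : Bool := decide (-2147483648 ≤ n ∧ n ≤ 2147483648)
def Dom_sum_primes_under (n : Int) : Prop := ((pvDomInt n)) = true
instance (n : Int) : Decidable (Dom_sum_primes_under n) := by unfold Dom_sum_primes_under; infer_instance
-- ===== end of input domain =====

-- B replaces A's per-number trial division with a Sieve of Eratosthenes (objective: faster).

-- termination facts for the while-loops (cited by the ports' decreasing_by)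
theorem pv_le_of_sq_le (i n : Int) (h : i * i ≤ n) : i ≤ n := by
  nlinarith [sq_nonneg i, sq_nonneg (i - 1)]

theorem pv_lt_of_sq_lt (i n : Int) (h : i * i < n) : i < n := by
  nlinarith [sq_nonneg i, sq_nonneg (i - 1)]

-- ===== PORT A =====
-- 'while i * i <= n: if n % i == 0: return False; i = i + 2'
def pvIsPrimeLoop (n : Int) (i : Int) : Bool :=
  if h : i * i ≤ n then
    if PySem.Int.mod n i == 0 then false
    else pvIsPrimeLoop n (i + 2)
  else true
termination_by (n + 1 - i).toNat
decreasing_by have := pv_le_of_sq_le i n h; omega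

def is_prime (n : Int) : Bool :=
  if n < 2 then false
  else if n == 2 then true
  else if PySem.Int.mod n 2 == 0 then false
  else pvIsPrimeLoop n 3

-- 'while i < n: if is_prime(i): sum = sum + i; i = i + 1'
def pvSumLoop (n : Int) (i : Int) (sum : Int) : Int :=
  if i < n then pvSumLoop n (i + 1) (if is_prime i then sum + i else sum) else sum
termination_by (n - i).toNat
decreasing_by omega

def sum_primes_under (n : Int) : Int := pvSumLoop n 2 0

-- ===== PORT B =====
-- 'for j in range(i * i, n, i): sieve[j] = False'
def pvMark (sieve : List Bool) (i n : Int) : List Bool :=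
  (PySem.List.pyRange (i * i) n i).foldl (fun s j => s.set j.toNat false) sieve

-- 'while i * i < n: … ; i = i + 1'
def pvSieveLoop (n : Int) (i : Int) (sieve : List Bool) : List Bool :=
  if h : i * i < n then pvSieveLoop n (i + 1) (pvMark sieve i n) else sieve
termination_by (n - i).toNat
decreasing_by have := pv_lt_of_sq_lt i n h; omega

def sum_primes_under_alt (n : Int) : Int :=
  if n ≤ 2 then 0
  else
    let sieve0 := ((List.replicate n.toNat true).set 0 false).set 1 false
    let sieve := pvSieveLoop n 2 sieve0
    -- 'sum(k for k, flag in enumerate(sieve) if flag)'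
    (PySem.List.enumerate sieve).foldl (fun acc kf => if kf.2 then acc + kf.1 else acc) 0

-- ===== PRECONDITION & SPEC =====
def Spec_sum_primes_under (n : Int) (out : Int) : Prop := out = sum_primes_under_alt n
instance (n : Int) (out : Int) : Decidable (Spec_sum_primes_under n out) := by unfold Spec_sum_primes_under; infer_instance

-- ===== CLAIM (what is proved, stated in full; the proofs are below) =====
def Claim_equal_sum_primes_under : Prop := ∀ (n : Int), Dom_sum_primes_under n → Spec_sum_primes_under n (sum_primes_under n)

-- ===== LEMMAS AND PROOFS =====

-- the arithmetic characterisation both programs compute: "2 ≤ k and no divisor d with 2 ≤ d, d² ≤ k"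
abbrev PpN (k : Nat) : Prop := 2 ≤ k ∧ ∀ d < k, 2 ≤ d → d * d ≤ k → ¬ (d ∣ k)

theorem pvIsPrimeLoop_iff : ∀ (c : Nat) (n i : Int), 3 ≤ i → i % 2 = 1 → (n + 1 - i).toNat = c →
    (pvIsPrimeLoop n i = true ↔ ∀ d : Int, i ≤ d → d % 2 = 1 → d * d ≤ n → ¬ d ∣ n) := by
  intro c
  induction c using Nat.strong_induction_on with
  | _ c ih =>
    intro n i hi hodd hc
    rw [pvIsPrimeLoop]
    by_cases h : i * i ≤ n
    · have hin : i ≤ n := pv_le_of_sq_le i n h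
      simp only [h, dif_pos]
      by_cases hd : PySem.Int.mod n i = 0
      · have hdvd : i ∣ n := (PySem.Int.mod_eq_zero_iff_dvd n i).mp hd
        simp only [hd]
        simp only [beq_self_eq_true, if_true]
        constructor
        · intro hfalse; exact absurd hfalse (by simp)
        · intro hall
          exact absurd hdvd (hall i le_rfl hodd h)
      · have hne : (PySem.Int.mod n i == 0) = false := by simp [hd]
        rw [hne]
        simp only [Bool.false_eq_true, if_false]
        have hrec := ih (n + 1 - (i + 2)).toNat (by omega) n (i + 2) (by omega) (by omega) rfl
        rw [hrec]
        constructor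
        · intro hall d hd1 hd2 hd3
          rcases eq_or_lt_of_le hd1 with rfl | hlt
          · exact fun hc => hd ((PySem.Int.mod_eq_zero_iff_dvd n i).mpr hc)
          · exact hall d (by omega) hd2 hd3
        · intro hall d hd1 hd2 hd3
          exact hall d (by omega) hd2 hd3
    · simp only [h, dif_neg, not_false_iff]
      constructor
      · intro _ d hd1 hd2 hd3
        exfalso
        have : i * i ≤ d * d := by nlinarith
        omega
      · intro _; trivial

theorem is_prime_eq (i : Int) (hi : 2 ≤ i) : is_prime i = decide (PpN i.toNat) := by
  rw [Bool.eq_iff_iff, decide_eq_true_eq]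
  unfold is_prime
  rcases eq_or_lt_of_le hi with rfl | h3
  · norm_num; decide
  · have h3 : 3 ≤ i := h3
    have hne2 : (i == 2) = false := by simp; omega
    have hnlt : ¬ i < 2 := by omega
    rw [if_neg hnlt, hne2]
    simp only [Bool.false_eq_true, if_false]
    rw [PySem.Int.mod_eq_emod_of_pos (by norm_num)]
    by_cases he : i % 2 = 0
    · have : (i % 2 == 0) = true := by simp [he]
      rw [this]
      simp only [if_true]
      constructor
      · intro hf; exact absurd hf (by simp)
      · rintro ⟨hk2, hall⟩
        exact (hall 2 (by omega) (by omega) (by omega) (by omega)).elim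
    · have hodd : i % 2 = 1 := by omega
      have : (i % 2 == 0) = false := by simp [he]
      rw [this]
      simp only [Bool.false_eq_true, if_false]
      rw [pvIsPrimeLoop_iff (i + 1 - 3).toNat i 3 (by omega) (by omega) rfl]
      constructor
      · intro hall
        refine ⟨by omega, fun d hdk hd2 hdd hdvd => ?_⟩
        by_cases hpar : d % 2 = 0
        · have h2d : 2 ∣ d := by omega
          have h2i : 2 ∣ i.toNat := dvd_trans h2d hdvd
          omega
        · have hd3 : 3 ≤ d := by omega
          have hdi : (d : Int) ∣ i := by
            have := Int.natCast_dvd_natCast.mpr hdvd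
            rwa [Int.toNat_of_nonneg (by omega)] at this
          refine hall d (by omega) (by omega) ?_ hdi
          have : ((d * d : Nat) : Int) ≤ ((i.toNat : Nat) : Int) := by exact_mod_cast hdd
          push_cast at this
          omega
      · rintro ⟨hk2, hall⟩ d hd3 hdo hdd hdvd
        have hdlt : d < d * d := by nlinarith
        have hdn : d.toNat * d.toNat ≤ i.toNat := by
          have h0 : (0:Int) ≤ d := by omega
          have : ((d.toNat * d.toNat : Nat) : Int) ≤ ((i.toNat : Nat) : Int) := by
            push_cast
            rw [Int.toNat_of_nonneg h0, Int.toNat_of_nonneg (by omega)]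
            exact hdd
          exact_mod_cast this
        refine hall d.toNat (by omega) (by omega) hdn ?_
        have : (d.toNat : Int) ∣ (i.toNat : Int) := by
          rw [Int.toNat_of_nonneg (by omega), Int.toNat_of_nonneg (by omega)]
          exact hdvd
        exact_mod_cast this

theorem pvSumLoop_eq (n : Int) : ∀ (c : Nat) (i acc : Int), 2 ≤ i → (n - i).toNat = c →
    pvSumLoop n i acc
      = acc + ((List.range' i.toNat c).map (fun k => if PpN k then (k : Int) else 0)).sum := by
  intro c
  induction c with
  | zero =>
    intro i acc hi hc
    rw [pvSumLoop, if_neg (by omega)]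
    simp
  | succ c ih =>
    intro i acc hi hc
    rw [pvSumLoop, if_pos (by omega)]
    rw [ih (i + 1) _ (by omega) (by omega)]
    have h1 : (i + 1).toNat = i.toNat + 1 := by omega
    have h2 : List.range' i.toNat (c + 1) = i.toNat :: List.range' (i.toNat + 1) c := rfl
    rw [h1, h2]
    simp only [List.map_cons, List.sum_cons]
    rw [is_prime_eq i hi]
    simp only [decide_eq_true_eq]
    have hcast : ((i.toNat : Nat) : Int) = i := Int.toNat_of_nonneg (by omega)
    by_cases hp : PpN i.toNat
    · rw [if_pos hp, if_pos hp, hcast]; ring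
    · rw [if_neg hp, if_neg hp]; ring

theorem foldl_set_length : ∀ (js : List Int) (s : List Bool),
    (js.foldl (fun t j => t.set j.toNat false) s).length = s.length := by
  intro js
  induction js with
  | nil => intro s; rfl
  | cons j js ih => intro s; rw [List.foldl_cons, ih, List.length_set]

theorem foldl_set_getD (k : Nat) : ∀ (js : List Int) (s : List Bool), k < s.length →
    (∀ j ∈ js, 0 ≤ j) →
    (js.foldl (fun t j => t.set j.toNat false) s).getD k false
      = (s.getD k false && !(decide ((k : Int) ∈ js))) := by
  intro js
  induction js with
  | nil => intro s hk _; simp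
  | cons j js ih =>
    intro s hk hpos
    rw [List.foldl_cons, ih _ (by rw [List.length_set]; exact hk) (fun x hx => hpos x (List.mem_cons_of_mem _ hx))]
    have hj : 0 ≤ j := hpos j List.mem_cons_self
    by_cases hjk : j.toNat = k
    · have : (k : Int) = j := by omega
      simp [List.getD_eq_getElem?_getD, hjk, hk, this]
    · have hne : (k : Int) ≠ j := by omega
      simp only [List.getD_eq_getElem?_getD, List.getElem?_set, hjk, if_false, List.mem_cons]
      simp [hne]

theorem pvMark_getD (s : List Bool) (i n : Int) (hi : 2 ≤ i) (k : Nat) (hk : k < s.length) :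
    (pvMark s i n).getD k false
      = (s.getD k false && !(decide (i * i ≤ (k : Int) ∧ (k : Int) < n ∧ i ∣ (k : Int)))) := by
  unfold pvMark
  rw [foldl_set_getD k _ s hk]
  · congr 2
    rw [Bool.eq_iff_iff, decide_eq_true_eq, decide_eq_true_eq]
    rw [PySem.List.mem_pyRange_iff_of_pos (by omega)]
    constructor
    · rintro ⟨h1, h2, h3⟩
      exact ⟨h1, h2, by have := dvd_add h3 (dvd_mul_left i i); simpa using this⟩
    · rintro ⟨h1, h2, h3⟩
      exact ⟨h1, h2, dvd_sub h3 (dvd_mul_left i i)⟩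
  · intro j hj
    rw [PySem.List.mem_pyRange_iff_of_pos (by omega)] at hj
    nlinarith [hj.1]

theorem pvMark_length (s : List Bool) (i n : Int) : (pvMark s i n).length = s.length :=
  foldl_set_length _ s

theorem pvSieveLoop_length (n : Int) : ∀ (c : Nat) (i : Int), (n - i).toNat = c →
    ∀ s : List Bool, (pvSieveLoop n i s).length = s.length := by
  intro c
  induction c with
  | zero =>
    intro i hc s
    rw [pvSieveLoop, dif_neg (by intro h; have := pv_lt_of_sq_lt i n h; omega)]
  | succ c ih =>
    intro i hc s
    rw [pvSieveLoop]
    by_cases h : i * i < n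
    · have := pv_lt_of_sq_lt i n h
      rw [dif_pos h, ih (i + 1) (by omega), pvMark_length]
    · rw [dif_neg h]

theorem pvSieveLoop_getD (n : Int) : ∀ (c : Nat) (i : Int), 2 ≤ i → (n - i).toNat = c →
    ∀ s : List Bool, s.length = n.toNat →
    (∀ k < n.toNat, s.getD k false
        = decide (2 ≤ k ∧ ∀ d < k, 2 ≤ d → (d : Int) < i → d * d ≤ k → ¬ d ∣ k)) →
    ∀ k < n.toNat, (pvSieveLoop n i s).getD k false = decide (PpN k) := by
  intro c
  induction c with
  | zero =>
    intro i hi hc s hlen hinv k hk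
    have hstop : ¬ i * i < n := by intro h; have := pv_lt_of_sq_lt i n h; omega
    rw [pvSieveLoop, dif_neg hstop, hinv k hk]
    rw [Bool.eq_iff_iff, decide_eq_true_eq, decide_eq_true_eq]
    unfold PpN
    constructor
    · rintro ⟨h2, hall⟩
      refine ⟨h2, fun d hdk hd2 hdd hdvd => hall d hdk hd2 ?_ hdd hdvd⟩
      by_contra hge
      push_neg at hge
      have h1 : i * i ≤ (d : Int) * (d : Int) := by nlinarith
      have h2 : ((d * d : Nat) : Int) ≤ ((k : Nat) : Int) := by exact_mod_cast hdd
      push_cast at h2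
      have h3 : (k : Int) < n := by omega
      nlinarith
    · rintro ⟨h2, hall⟩
      exact ⟨h2, fun d hdk hd2 _ hdd hdvd => hall d hdk hd2 hdd hdvd⟩
  | succ c ih =>
    intro i hi hc s hlen hinv k hk
    by_cases h : i * i < n
    · have hlt := pv_lt_of_sq_lt i n h
      rw [pvSieveLoop, dif_pos h]
      refine ih (i + 1) (by omega) (by omega) _ (by rw [pvMark_length, hlen]) ?_ k hk
      intro m hm
      rw [pvMark_getD s i n hi m (by omega), hinv m hm]
      rw [Bool.and_comm, ← decide_not, ← Bool.decide_and, Bool.eq_iff_iff,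
        decide_eq_true_eq, decide_eq_true_eq]
      constructor
      · rintro ⟨hnc, h2, hall⟩
        refine ⟨h2, fun d hdm hd2 hdi hdd hdvd => ?_⟩
        rcases lt_or_eq_of_le (by omega : (d : Int) + 1 ≤ i + 1) with hlt' | heq
        · exact hall d hdm hd2 (by omega) hdd hdvd
        · apply hnc
          have hdi' : (d : Int) = i := by omega
          refine ⟨by nlinarith [hdi' ▸ (by exact_mod_cast hdd : ((d:Int)) * d ≤ (m:Int))], by omega, ?_⟩
          rw [← hdi']
          exact_mod_cast hdvd
      · rintro ⟨h2, hall⟩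
        refine ⟨?_, h2, fun d hdm hd2 hdi hdd hdvd => hall d hdm hd2 (by omega) hdd hdvd⟩
        rintro ⟨hc1, hc2, hc3⟩
        have h0i : (0:Int) ≤ i := by omega
        have hii : (i : Int) < (m : Int) := by nlinarith
        have hdm' : i.toNat < m := by omega
        refine hall i.toNat hdm' (by omega) (by omega) ?_ ?_
        · have hcm : (i.toNat : Int) * (i.toNat : Int) ≤ (m : Int) := by
            rw [Int.toNat_of_nonneg h0i]; exact hc1
          exact_mod_cast hcm
        · have hcd : (i.toNat : Int) ∣ (m : Int) := by
            rw [Int.toNat_of_nonneg h0i]; exact hc3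
          exact_mod_cast hcd
    · rw [pvSieveLoop, dif_neg h]
      rw [hinv k hk]
      rw [Bool.eq_iff_iff, decide_eq_true_eq, decide_eq_true_eq]
      unfold PpN
      constructor
      · rintro ⟨h2, hall⟩
        refine ⟨h2, fun d hdk hd2 hdd hdvd => hall d hdk hd2 ?_ hdd hdvd⟩
        by_contra hge
        push_neg at hge
        have h1 : i * i ≤ (d : Int) * (d : Int) := by nlinarith
        have h2 : ((d * d : Nat) : Int) ≤ ((k : Nat) : Int) := by exact_mod_cast hdd
        push_cast at h2
        have h3 : (k : Int) < n := by omega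
        nlinarith
      · rintro ⟨h2, hall⟩
        exact ⟨h2, fun d hdk hd2 _ hdd hdvd => hall d hdk hd2 hdd hdvd⟩

theorem enumFold : ∀ (s : List Bool) (st acc : Int),
    (PySem.List.enumerate s st).foldl (fun a kf => if kf.2 then a + kf.1 else a) acc
      = acc + ((List.range s.length).map (fun k => if s.getD k false then st + (k : Int) else 0)).sum := by
  intro s
  induction s with
  | nil => intro st acc; simp [PySem.List.enumerate_nil]
  | cons b s ih =>
    intro st acc
    rw [PySem.List.enumerate_cons, List.foldl_cons, ih (st + 1)]
    conv_rhs => rw [List.length_cons, List.range_succ_eq_map]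
    simp only [List.map_cons, List.getD_cons_zero, List.sum_cons, List.map_map]
    have hmap : ((fun k => if (b :: s).getD k false = true then st + (k : Int) else 0) ∘ Nat.succ)
        = (fun k => if s.getD k false = true then (st + 1) + (k : Int) else 0) := by
      funext k
      simp only [Function.comp_apply, List.getD_cons_succ]
      split
      · push_cast; ring
      · rfl
    rw [hmap]
    cases b <;> simp <;> ring

theorem init_getD (m : Nat) (k : Nat) (hk : k < m) :
    (((List.replicate m true).set 0 false).set 1 false).getD k false
      = decide (2 ≤ k ∧ ∀ d < k, 2 ≤ d → (d : Int) < 2 → d * d ≤ k → ¬ d ∣ k) := by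
  have hvac : ∀ k : Nat, (∀ d < k, 2 ≤ d → (d : Int) < 2 → d * d ≤ k → ¬ d ∣ k) := by
    intro k d _ hd2 hdlt _ _
    omega
  match k with
  | 0 => simp [List.getD_eq_getElem?_getD, List.getElem?_set, hk]
  | 1 => simp [List.getD_eq_getElem?_getD, List.getElem?_set, hk]
  | (k + 2) =>
    have : (decide (2 ≤ k + 2 ∧ ∀ d < k + 2, 2 ≤ d → (d : Int) < 2 → d * d ≤ k + 2 → ¬ d ∣ k + 2)) = true := by
      simp only [decide_eq_true_eq]
      exact ⟨by omega, hvac (k + 2)⟩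
    rw [this]
    simp [List.getD_eq_getElem?_getD, List.getElem?_set, List.getElem?_replicate, hk]

theorem sum_primes_under_spec : Claim_equal_sum_primes_under := by
  intro n _
  unfold Spec_sum_primes_under sum_primes_under
  simp only [sum_primes_under_alt]
  by_cases hn : n ≤ 2
  · rw [if_pos hn, pvSumLoop, if_neg (by omega)]
  · rw [if_neg hn]
    push_neg at hn
    have hn3 : 3 ≤ n := by omega
    have hm3 : 3 ≤ n.toNat := by omega
    set s0 := ((List.replicate n.toNat true).set 0 false).set 1 false with hs0
    have hlen0 : s0.length = n.toNat := by simp [hs0]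
    have hfin : ∀ k < n.toNat, (pvSieveLoop n 2 s0).getD k false = decide (PpN k) :=
      pvSieveLoop_getD n (n - 2).toNat 2 (by omega) (by omega) s0 hlen0
        (fun k hk => init_getD n.toNat k hk)
    have hflen : (pvSieveLoop n 2 s0).length = n.toNat := by
      rw [pvSieveLoop_length n (n - 2).toNat 2 (by omega)]; exact hlen0
    rw [pvSumLoop_eq n (n - 2).toNat 2 0 (by omega) (by omega), enumFold, hflen]
    have hBmap : (List.range n.toNat).map (fun k => if (pvSieveLoop n 2 s0).getD k false then 0 + (k : Int) else 0)
        = (List.range n.toNat).map (fun k => if PpN k then (k : Int) else 0) := by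
      apply List.map_congr_left
      intro k hk
      rw [List.mem_range] at hk
      rw [hfin k hk]
      simp only [decide_eq_true_eq]
      by_cases hp : PpN k
      · rw [if_pos hp, if_pos hp]; ring
      · rw [if_neg hp, if_neg hp]
    rw [hBmap]
    obtain ⟨c, hc⟩ : ∃ c, n.toNat = c + 2 := ⟨n.toNat - 2, by omega⟩
    have hc2 : (n - 2).toNat = c := by omega
    rw [hc2, hc, List.range_eq_range']
    have hsplit : List.range' 0 (c + 2) = 0 :: 1 :: List.range' 2 c := rfl
    rw [hsplit]
    simp only [List.map_cons, List.sum_cons]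
    norm_num
    have h0 : ¬ PpN 0 := by decide
    have h1 : ¬ PpN 1 := by decide
    simp [h0, h1]
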